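-- pv_equiv track=rewrite | github.com/matheusvictoor/python-exercises | numeros/main.py | seleciona_perfeitos
-- ===== SOURCE A (Python) =====
-- def seleciona_perfeitos(lista):
--     lista_perfeito = []
--     for elemento in lista:
--         soma = 0
--         for i in range(1, elemento):
--             if elemento % i == 0:
--                 soma += i
--         if soma == elemento:
--             lista_perfeito.append(elemento)
--     return lista_perfeito
-- ===== SOURCE B (Python) =====
-- def seleciona_perfeitos(lista):
--     perfeitos = []
--     for n in lista:
--         s = 0
--         d = 1
--         while d * d <= n:
--             if n % d == 0:
--                 if d != n:
--                     s += d
--                 q = n // d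
--                 if q != d and q != n:
--                     s += q
--             d += 1
--         if s == n:
--             perfeitos.append(n)
--     return perfeitos
-- ===== Notes on version B (the rewrite author's own statement) =====
-- stated objective: faster
-- what changed: B replaces A's per-element scan of all i in [1,n) by a loop over d with d*d <= n that adds each small divisor d together with its cofactor n//d, so the proper-divisor sum is computed in O(sqrt(n)) instead of O(n) per element.
import Mathlib
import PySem

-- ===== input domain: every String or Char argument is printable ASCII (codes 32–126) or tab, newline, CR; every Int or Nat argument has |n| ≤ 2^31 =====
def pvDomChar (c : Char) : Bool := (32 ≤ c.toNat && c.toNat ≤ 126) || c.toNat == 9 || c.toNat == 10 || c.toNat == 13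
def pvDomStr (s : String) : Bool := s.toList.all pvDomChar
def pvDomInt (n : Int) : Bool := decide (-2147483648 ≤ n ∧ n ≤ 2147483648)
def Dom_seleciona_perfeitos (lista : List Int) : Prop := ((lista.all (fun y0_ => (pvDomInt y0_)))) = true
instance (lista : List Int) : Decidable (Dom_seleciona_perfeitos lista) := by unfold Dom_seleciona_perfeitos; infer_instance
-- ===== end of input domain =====

-- B replaces A's O(n) proper-divisor scan per element by an O(√n) loop that adds each divisor d ≤ √n together with its cofactor n//d (objective: faster).


-- ===== PORT A =====
def seleciona_perfeitos (lista : List Int) : List Int :=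
  lista.foldl (fun lista_perfeito elemento =>
    let soma := (PySem.List.pyRange 1 elemento 1).foldl
      (fun soma i => if PySem.Int.mod elemento i = 0 then soma + i else soma) 0
    if soma = elemento then lista_perfeito ++ [elemento] else lista_perfeito) []

-- ===== PORT B =====
-- the 'while d * d <= n' loop of Source B (d increases by 1 each turn)
def sumBLoop (n d s : Int) : Int :=
  if d * d ≤ n then
    sumBLoop n (d + 1)
      (if PySem.Int.mod n d = 0 then
        let s1 := if d ≠ n then s + d else s
        let q := PySem.Int.floordiv n d
        if q ≠ d ∧ q ≠ n then s1 + q else s1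
      else s)
  else s
termination_by (n + 1 - d).toNat
decreasing_by
  have hdn : d ≤ n := by nlinarith [mul_self_nonneg d, mul_self_nonneg (d - 1)]
  omega

def seleciona_perfeitos_alt (lista : List Int) : List Int :=
  lista.foldl (fun perfeitos n =>
    let s := sumBLoop n 1 0
    if s = n then perfeitos ++ [n] else perfeitos) []

-- ===== PRECONDITION & SPEC =====
def Spec_seleciona_perfeitos (lista : List Int) (out : List Int) : Prop := out = seleciona_perfeitos_alt lista
instance (lista : List Int) (out : List Int) : Decidable (Spec_seleciona_perfeitos lista out) := by unfold Spec_seleciona_perfeitos; infer_instance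

-- ===== CLAIM (what is proved, stated in full; the proofs are below) =====
def Claim_equal_seleciona_perfeitos : Prop := ∀ (lista : List Int), Dom_seleciona_perfeitos lista → Spec_seleciona_perfeitos lista (seleciona_perfeitos lista)

-- ===== LEMMAS AND PROOFS =====

-- A's inner loop, as a named function (identical to the 'let soma' in the port of A)
def somaA (n : Int) : Int :=
  (PySem.List.pyRange 1 n 1).foldl
    (fun soma i => if PySem.Int.mod n i = 0 then soma + i else soma) 0

-- B's per-d contribution, over Nat
def contribB (N i : Nat) : Nat :=
  if N % i = 0 then
    (if i ≠ N then i else 0) + (if N / i ≠ i ∧ N / i ≠ N then N / i else 0)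
  else 0

lemma foldl_if_add (p : Int → Prop) [DecidablePred p] (l : List Int) (a : Int) :
    l.foldl (fun s i => if p i then s + i else s) a
      = a + (l.map (fun i => if p i then i else 0)).sum := by
  induction l generalizing a with
  | nil => simp
  | cons x t ih =>
    by_cases h : p x
    · simp [h, ih, add_assoc]
    · simp [h, ih]

lemma sum_map_range_int (f : Nat → Int) (k : Nat) :
    ((List.range k).map f).sum = ∑ i ∈ Finset.range k, f i := by
  induction k with
  | zero => simp
  | succ m ih => simp [List.range_succ, Finset.sum_range_succ, ih]

-- A-side characterisation: the inner loop computes the sum of proper divisors of n.toNat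
lemma nat_sum_divisors (N : Nat) (hN : 1 ≤ N) :
    (∑ i ∈ Finset.range (N - 1), if N % (1 + i) = 0 then 1 + i else 0)
      = ∑ d ∈ N.properDivisors, d := by
  have hset : (Finset.Ico 1 N).filter (fun j => N % j = 0) = N.properDivisors := by
    ext a
    simp only [Finset.mem_filter, Finset.mem_Ico, Nat.mem_properDivisors]
    constructor
    · rintro ⟨⟨h1, h2⟩, h3⟩
      exact ⟨Nat.dvd_iff_mod_eq_zero.mpr h3, h2⟩
    · rintro ⟨h1, h2⟩
      have : 0 < a := Nat.pos_of_dvd_of_pos h1 (by omega)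
      exact ⟨⟨this, h2⟩, Nat.dvd_iff_mod_eq_zero.mp h1⟩
  calc (∑ i ∈ Finset.range (N - 1), if N % (1 + i) = 0 then 1 + i else 0)
      = ∑ j ∈ Finset.Ico 1 N, (if N % j = 0 then j else 0) := by
        rw [Finset.sum_Ico_eq_sum_range]
    _ = ∑ j ∈ (Finset.Ico 1 N).filter (fun j => N % j = 0), j := by
        rw [Finset.sum_filter]
    _ = ∑ d ∈ N.properDivisors, d := by rw [hset]

lemma somaA_eq (n : Int) :
    somaA n = ((∑ i ∈ (n.toNat).properDivisors, i : Nat) : Int) := by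
  rcases le_or_gt n 0 with hle | hpos
  · have h1 : n.toNat = 0 := by omega
    rw [somaA, PySem.List.pyRange_one_eq_nil (by omega)]
    simp [h1]
  · set N := n.toNat with hNdef
    have hn : n = (N : Int) := by omega
    have hN : 1 ≤ N := by omega
    have hK : (n - 1).toNat = N - 1 := by omega
    rw [somaA, foldl_if_add (fun i => PySem.Int.mod n i = 0),
      PySem.List.pyRange_one, hK, List.map_map, sum_map_range_int]
    have hterm : ∀ i ∈ Finset.range (N - 1),
        ((fun i => if PySem.Int.mod n i = 0 then i else 0) ∘ fun k : Nat => (1 : Int) + ↑k) i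
          = ((if N % (1 + i) = 0 then 1 + i else 0 : Nat) : Int) := by
      intro i _
      have hcast : ((1 : Int) + (i : Int)) = ((1 + i : Nat) : Int) := by push_cast; ring
      simp only [Function.comp, hcast, hn, PySem.Int.mod_natCast]
      by_cases h : N % (1 + i) = 0
      · rw [if_pos (by exact_mod_cast h : ((N % (1 + i) : Nat) : Int) = 0), if_pos h]
      · rw [if_neg (by exact_mod_cast h : ¬((N % (1 + i) : Nat) : Int) = 0), if_neg h,
          Nat.cast_zero]
    rw [Finset.sum_congr rfl hterm, ← Nat.cast_sum, nat_sum_divisors N hN]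
    simp

-- B-side loop characterisation
lemma sumBLoop_eq (N : Nat) (_hN : 1 ≤ N) :
    ∀ (fuel d : Nat), 1 ≤ d → N.sqrt + 1 - d ≤ fuel → ∀ (s : Int),
      sumBLoop (N : Int) (d : Int) s
        = s + ((∑ i ∈ Finset.Icc d N.sqrt, contribB N i : Nat) : Int) := by
  intro fuel
  induction fuel with
  | zero =>
    intro d hd hfuel s
    have hlt : N < d * d := Nat.sqrt_lt.mp (by omega)
    rw [sumBLoop, if_neg (by exact_mod_cast not_le.mpr hlt)]
    rw [Finset.Icc_eq_empty (by omega)]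
    simp
  | succ m ih =>
    intro d hd hfuel s
    by_cases hg : d * d ≤ N
    · have hds : d ≤ N.sqrt := Nat.le_sqrt.mpr hg
      rw [sumBLoop, if_pos (by exact_mod_cast hg)]
      have hstep : ((d : Int) + 1) = ((d + 1 : Nat) : Int) := by push_cast; ring
      rw [hstep, ih (d + 1) (by omega) (by omega)]
      have hsplit : Finset.Icc d N.sqrt = insert d (Finset.Icc (d + 1) N.sqrt) := by
        ext a
        simp only [Finset.mem_Icc, Finset.mem_insert]
        omega
      rw [hsplit, Finset.sum_insert (by simp [Finset.mem_Icc])]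
      have hs' : (if PySem.Int.mod (N : Int) (d : Int) = 0 then
            let s1 := if (d : Int) ≠ (N : Int) then s + (d : Int) else s
            let q := PySem.Int.floordiv (N : Int) (d : Int)
            if q ≠ (d : Int) ∧ q ≠ (N : Int) then s1 + q else s1
          else s) = s + ((contribB N d : Nat) : Int) := by
        simp only [PySem.Int.mod_natCast, PySem.Int.floordiv_natCast, Nat.cast_eq_zero,
          ne_eq, Nat.cast_inj, contribB]
        split_ifs <;> push_cast <;> ring
      rw [hs']
      push_cast
      ring
    · have hlt : N < d * d := by omega
      rw [sumBLoop, if_neg (by exact_mod_cast not_le.mpr hlt)]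
      have : N.sqrt < d := Nat.sqrt_lt.mpr hlt
      rw [Finset.Icc_eq_empty (by omega)]
      simp

-- the divisor-pairing identity
lemma pairing (N : Nat) (hN : 2 ≤ N) :
    (∑ i ∈ N.properDivisors, i) = ∑ d ∈ Finset.Icc 1 N.sqrt, contribB N d := by
  have hN0 : N ≠ 0 := by omega
  set K := N.sqrt with hKdef
  have hKN : K < N := Nat.sqrt_lt_self (by omega)
  have hK1 : 1 ≤ K := Nat.le_sqrt.mpr (by omega)
  have hKsq : K * K ≤ N := Nat.sqrt_le N
  have hKsucc : N < (K + 1) * (K + 1) := Nat.lt_succ_sqrt N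
  -- rewrite RHS as a sum over the small divisors S
  have hS : (Finset.Icc 1 K).filter (fun d => N % d = 0)
      = N.properDivisors.filter (fun d => d ≤ K) := by
    ext a
    simp only [Finset.mem_filter, Finset.mem_Icc, Nat.mem_properDivisors]
    constructor
    · rintro ⟨⟨h1, h2⟩, h3⟩
      exact ⟨⟨Nat.dvd_iff_mod_eq_zero.mpr h3, by omega⟩, h2⟩
    · rintro ⟨⟨h1, h2⟩, h3⟩
      have : 0 < a := Nat.pos_of_dvd_of_pos h1 (by omega)
      exact ⟨⟨this, h3⟩, Nat.dvd_iff_mod_eq_zero.mp h1⟩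
  have hRHS : (∑ d ∈ Finset.Icc 1 K, contribB N d)
      = (∑ d ∈ N.properDivisors.filter (fun d => d ≤ K), d)
        + ∑ d ∈ (N.properDivisors.filter (fun d => d ≤ K)).filter
            (fun d => N / d ≠ d ∧ N / d ≠ N), N / d := by
    unfold contribB
    rw [← Finset.sum_filter, hS, Finset.sum_add_distrib]
    congr 1
    · refine Finset.sum_congr rfl ?_
      intro d hd
      simp only [Finset.mem_filter, Nat.mem_properDivisors] at hd
      rw [if_pos (Nat.ne_of_lt hd.1.2)]
    · conv_rhs => rw [Finset.sum_filter, Finset.sum_filter]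
      rw [Finset.sum_filter]
  rw [hRHS]
  -- split LHS by size
  rw [← Finset.sum_filter_add_sum_filter_not N.properDivisors (fun d => d ≤ K) (fun d => d)]
  congr 1
  -- big proper divisors correspond to the cofactors of small ones
  refine Finset.sum_nbij' (fun e => N / e) (fun d => N / d) ?_ ?_ ?_ ?_ ?_
  · intro e he
    simp only [Finset.mem_filter, Nat.mem_properDivisors, not_le] at he ⊢
    obtain ⟨⟨hdvd, hlt⟩, hKe⟩ := he
    have hepos : 0 < e := Nat.pos_of_dvd_of_pos hdvd (by omega)
    have hmul : N / e * e = N := Nat.div_mul_cancel hdvd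
    have hqK : N / e ≤ K := by
      by_contra hq
      have hle : (K + 1) * (K + 1) ≤ N / e * e :=
        Nat.mul_le_mul (by omega) (by omega)
      have : N < N := lt_of_lt_of_le hKsucc (hmul ▸ hle)
      exact absurd this (lt_irrefl N)
    refine ⟨⟨⟨Nat.div_dvd_of_dvd hdvd, Nat.div_lt_self (by omega) (by omega)⟩, hqK⟩, ?_, ?_⟩
    · rw [Nat.div_div_self hdvd hN0]; omega
    · rw [Nat.div_div_self hdvd hN0]; omega
  · intro d hd
    simp only [Finset.mem_filter, Nat.mem_properDivisors, not_le] at hd ⊢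
    obtain ⟨⟨⟨hdvd, hlt⟩, hdK⟩, hne1, hne2⟩ := hd
    have hdpos : 0 < d := Nat.pos_of_dvd_of_pos hdvd (by omega)
    have hmul : d * (N / d) = N := Nat.mul_div_cancel' hdvd
    have hepos : 0 < N / d := Nat.div_pos (Nat.le_of_dvd (by omega) hdvd) hdpos
    refine ⟨⟨Nat.div_dvd_of_dvd hdvd, lt_of_le_of_ne (Nat.div_le_self N d) hne2⟩, ?_⟩
    by_contra he
    have he : N / d ≤ K := by omega
    have h1 : d * (N / d) ≤ K * (N / d) := Nat.mul_le_mul_right _ hdK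
    have h2 : K * (N / d) ≤ K * K := Nat.mul_le_mul_left _ he
    have hNK : N = K * K := by omega
    have h3 : d * (N / d) = K * (N / d) := by omega
    have h4 : d = K := Nat.eq_of_mul_eq_mul_right hepos h3
    have h5 : K * (N / d) = K * K := by omega
    have h6 : N / d = K := Nat.eq_of_mul_eq_mul_left (by omega) h5
    omega
  · intro e he
    simp only [Finset.mem_filter, Nat.mem_properDivisors] at he
    exact Nat.div_div_self he.1.1 hN0
  · intro d hd
    simp only [Finset.mem_filter, Nat.mem_properDivisors] at hd
    exact Nat.div_div_self hd.1.1.1 hN0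
  · intro e he
    simp only [Finset.mem_filter, Nat.mem_properDivisors] at he
    rw [Nat.div_div_self he.1.1 hN0]

lemma per_element (n : Int) : somaA n = sumBLoop n 1 0 := by
  rcases le_or_gt n 0 with hle | hpos
  · rw [somaA_eq, sumBLoop, if_neg (by omega : ¬ (1 : Int) * 1 ≤ n)]
    have : n.toNat = 0 := by omega
    simp [this]
  · set N := n.toNat with hNdef
    have hn : n = (N : Int) := by omega
    have hN : 1 ≤ N := by omega
    have hone : ((1 : Nat) : Int) = (1 : Int) := by norm_num
    have hloop := sumBLoop_eq N hN N.sqrt 1 (by omega) (by omega) 0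
    rw [hone] at hloop
    rw [somaA_eq, hn, hloop, zero_add, Nat.cast_inj]
    rcases eq_or_lt_of_le hN with h1 | h2
    · rw [← h1]
      decide
    · exact pairing N (by omega)

lemma foldl_ext {α β : Type} (f g : α → β → α) (h : ∀ acc x, f acc x = g acc x) :
    ∀ (l : List β) (acc : α), l.foldl f acc = l.foldl g acc := by
  intro l
  induction l with
  | nil => intro acc; rfl
  | cons x t ih => intro acc; simp only [List.foldl_cons, h]; exact ih _

theorem seleciona_perfeitos_spec : Claim_equal_seleciona_perfeitos := by
  intro lista _
  unfold Spec_seleciona_perfeitos seleciona_perfeitos seleciona_perfeitos_alt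
  refine foldl_ext _ _ (fun acc x => ?_) lista []
  have hx : (PySem.List.pyRange 1 x 1).foldl
      (fun soma i => if PySem.Int.mod x i = 0 then soma + i else soma) 0
      = sumBLoop x 1 0 := per_element x
  simp only [hx]
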